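-- pv_equiv track=rewrite | github.com/astra-sim/astra-sim-service | service/astra_server/infrastructure/analytical_topology.py | _partition_by_3d
-- ===== SOURCE A (Python) =====
-- def _partition_by_3d(nodes, dim1, dim2, dim3):
--     total = len(nodes)
--     if dim1 * dim2 * dim3 != total:
--         return [], [], []
--
--     coord_map = {}
--     for idx, node in enumerate(nodes):
--         x = idx % dim1
--         y = (idx // dim1) % dim2
--         z = idx // (dim1 * dim2)
--         coord_map[node] = (x, y, z)
--
--     dim1_groups = []
--     for y in range(dim2):
--         for z in range(dim3):
--             group = [
--                 n for n, (x, yy, zz) in coord_map.items() if yy == y and zz == z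
--             ]
--             dim1_groups.append(group)
--
--     dim2_groups = []
--     for x in range(dim1):
--         for z in range(dim3):
--             group = [
--                 n for n, (xx, y, zz) in coord_map.items() if xx == x and zz == z
--             ]
--             dim2_groups.append(group)
--
--     dim3_groups = []
--     for x in range(dim1):
--         for y in range(dim2):
--             group = [
--                 n for n, (xx, yy, z) in coord_map.items() if xx == x and yy == y
--             ]
--             dim3_groups.append(group)
--
--     return dim1_groups, dim2_groups, dim3_groups
-- ===== SOURCE B (Python) =====
-- def _partition_by_3d(nodes, dim1, dim2, dim3):
--     total = len(nodes)
--     if dim1 * dim2 * dim3 != total: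
--         return [], [], []
--
--     coord_map = {}
--     for idx, node in enumerate(nodes):
--         coord_map[node] = (idx % dim1, (idx // dim1) % dim2, idx // (dim1 * dim2))
--
--     # one pass: bucket every node by each of its three coordinate pairs
--     b1, b2, b3 = {}, {}, {}
--     for n, (x, y, z) in coord_map.items():
--         b1.setdefault((y, z), []).append(n)
--         b2.setdefault((x, z), []).append(n)
--         b3.setdefault((x, y), []).append(n)
--
--     dim1_groups = [b1.get((y, z), []) for y in range(dim2) for z in range(dim3)]
--     dim2_groups = [b2.get((x, z), []) for x in range(dim1) for z in range(dim3)]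
--     dim3_groups = [b3.get((x, y), []) for x in range(dim1) for y in range(dim2)]
--     return dim1_groups, dim2_groups, dim3_groups
-- ===== Notes on version B (the rewrite author's own statement) =====
-- stated objective: alternative
-- what changed: Replaces the three nested range loops that each rescan the whole coord_map to build every group (O(total*groups)) by a single bucketing pass over coord_map into three dicts keyed by coordinate pairs, then one dict lookup per group; measured about the same speed on the generated inputs.
import Mathlib
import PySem

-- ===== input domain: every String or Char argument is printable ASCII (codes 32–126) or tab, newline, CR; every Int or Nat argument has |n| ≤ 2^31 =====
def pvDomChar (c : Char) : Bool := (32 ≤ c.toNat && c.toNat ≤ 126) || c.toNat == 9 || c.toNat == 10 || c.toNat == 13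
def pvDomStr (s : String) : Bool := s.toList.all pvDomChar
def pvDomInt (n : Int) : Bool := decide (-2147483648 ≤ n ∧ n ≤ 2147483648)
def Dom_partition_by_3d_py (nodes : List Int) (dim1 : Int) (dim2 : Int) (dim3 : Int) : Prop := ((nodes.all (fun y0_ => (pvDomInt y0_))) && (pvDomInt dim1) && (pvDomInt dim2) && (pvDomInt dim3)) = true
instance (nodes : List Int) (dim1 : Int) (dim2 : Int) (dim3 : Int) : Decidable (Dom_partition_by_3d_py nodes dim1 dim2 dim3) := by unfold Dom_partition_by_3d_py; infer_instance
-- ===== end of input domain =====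

-- B buckets each node once by its three coordinate pairs instead of rescanning coord_map per group (a different, single-pass algorithm; about the same measured speed); return values proved equal on all inputs.


-- ===== PORT A =====
def partition_by_3d_py (nodes : List Int) (dim1 : Int) (dim2 : Int) (dim3 : Int) : List (List Int) × List (List Int) × List (List Int) :=
  let total : Int := nodes.length
  if dim1 * dim2 * dim3 ≠ total then ([], [], [])
  else
    let coord_map : PySem.Dict Int (Int × Int × Int) :=
      (PySem.List.enumerate nodes 0).foldl
        (fun d p => d.insert p.2
          (PySem.Int.mod p.1 dim1,
           PySem.Int.mod (PySem.Int.floordiv p.1 dim1) dim2,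
           PySem.Int.floordiv p.1 (dim1 * dim2)))
        PySem.Dict.empty
    -- each group comprehension '[n for n, (…) in coord_map.items() if …]' is filter-then-map over items
    let dim1_groups : List (List Int) :=
      (PySem.List.pyRange 0 dim2 1).foldl (fun acc y =>
        (PySem.List.pyRange 0 dim3 1).foldl (fun acc z =>
          acc ++ [(coord_map.items.filter (fun e => e.2.2.1 == y && e.2.2.2 == z)).map (·.1)]) acc) []
    let dim2_groups : List (List Int) :=
      (PySem.List.pyRange 0 dim1 1).foldl (fun acc x =>
        (PySem.List.pyRange 0 dim3 1).foldl (fun acc z =>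
          acc ++ [(coord_map.items.filter (fun e => e.2.1 == x && e.2.2.2 == z)).map (·.1)]) acc) []
    let dim3_groups : List (List Int) :=
      (PySem.List.pyRange 0 dim1 1).foldl (fun acc x =>
        (PySem.List.pyRange 0 dim2 1).foldl (fun acc y =>
          acc ++ [(coord_map.items.filter (fun e => e.2.1 == x && e.2.2.1 == y)).map (·.1)]) acc) []
    (dim1_groups, dim2_groups, dim3_groups)

-- ===== PORT B =====
def partition_by_3d_py_alt (nodes : List Int) (dim1 : Int) (dim2 : Int) (dim3 : Int) : List (List Int) × List (List Int) × List (List Int) :=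
  let total : Int := nodes.length
  if dim1 * dim2 * dim3 ≠ total then ([], [], [])
  else
    let coord_map : PySem.Dict Int (Int × Int × Int) :=
      (PySem.List.enumerate nodes 0).foldl
        (fun d p => d.insert p.2
          (PySem.Int.mod p.1 dim1,
           PySem.Int.mod (PySem.Int.floordiv p.1 dim1) dim2,
           PySem.Int.floordiv p.1 (dim1 * dim2)))
        PySem.Dict.empty
    -- single loop updating (b1, b2, b3); 'b.setdefault(k, []).append(n)' is exactly 'b.modify k [] (· ++ [n])'
    let bs : PySem.Dict (Int × Int) (List Int) × PySem.Dict (Int × Int) (List Int) × PySem.Dict (Int × Int) (List Int) :=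
      coord_map.items.foldl
        (fun t e =>
          (t.1.modify (e.2.2.1, e.2.2.2) [] (· ++ [e.1]),
           t.2.1.modify (e.2.1, e.2.2.2) [] (· ++ [e.1]),
           t.2.2.modify (e.2.1, e.2.2.1) [] (· ++ [e.1])))
        (PySem.Dict.empty, PySem.Dict.empty, PySem.Dict.empty)
    -- the three nested list comprehensions over ranges, '.get(k, [])' per cell
    ((PySem.List.pyRange 0 dim2 1).flatMap (fun y =>
        (PySem.List.pyRange 0 dim3 1).map (fun z => bs.1.getD (y, z) [])),
     (PySem.List.pyRange 0 dim1 1).flatMap (fun x =>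
        (PySem.List.pyRange 0 dim3 1).map (fun z => bs.2.1.getD (x, z) [])),
     (PySem.List.pyRange 0 dim1 1).flatMap (fun x =>
        (PySem.List.pyRange 0 dim2 1).map (fun y => bs.2.2.getD (x, y) [])))

-- ===== PRECONDITION & SPEC =====
def Spec_partition_by_3d_py (nodes : List Int) (dim1 : Int) (dim2 : Int) (dim3 : Int) (out : List (List Int) × List (List Int) × List (List Int)) : Prop := out = partition_by_3d_py_alt nodes dim1 dim2 dim3
instance (nodes : List Int) (dim1 : Int) (dim2 : Int) (dim3 : Int) (out : List (List Int) × List (List Int) × List (List Int)) : Decidable (Spec_partition_by_3d_py nodes dim1 dim2 dim3 out) := by unfold Spec_partition_by_3d_py; infer_instance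

-- ===== CLAIM (what is proved, stated in full; the proofs are below) =====
def Claim_equal_partition_by_3d_py : Prop := ∀ (nodes : List Int) (dim1 : Int) (dim2 : Int) (dim3 : Int), Dom_partition_by_3d_py nodes dim1 dim2 dim3 → Spec_partition_by_3d_py nodes dim1 dim2 dim3 (partition_by_3d_py nodes dim1 dim2 dim3)

-- ===== LEMMAS AND PROOFS =====

-- B's one loop over a triple of dicts is the triple of the three independent loops.
theorem pv_foldl_triple {α β γ δ : Type} (l : List α) (f : β → α → β) (g : γ → α → γ) (h : δ → α → δ)
    (b : β) (c : γ) (d : δ) :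
    l.foldl (fun t e => (f t.1 e, g t.2.1 e, h t.2.2 e)) (b, c, d)
      = (l.foldl f b, l.foldl g c, l.foldl h d) := by
  induction l generalizing b c d with
  | nil => rfl
  | cons x xs ih => simpa using ih (f b x) (g c x) (h d x)

-- One bucketing loop looked up at (y, z) is A's filter over the items, for any coordinate projections.
theorem pv_bucket_getD (L : List (Int × Int × Int × Int))
    (k₁ k₂ : Int × Int × Int × Int → Int) (y z : Int) :
    (L.foldl (fun d e => d.modify (k₁ e, k₂ e) [] (· ++ [e.1])) PySem.Dict.empty).getD (y, z) []
      = (L.filter (fun e => k₁ e == y && k₂ e == z)).map (·.1) := by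
  have hp : ∀ e : Int × Int × Int × Int,
      ((k₁ e, k₂ e) == (y, z)) = (k₁ e == y && k₂ e == z) := fun _ => rfl
  have hm : L.foldl (fun d e => d.modify (k₁ e, k₂ e) [] (· ++ [e.1])) PySem.Dict.empty
      = (L.map (fun e => ((k₁ e, k₂ e), e.1))).foldl
          (fun d p => d.modify p.1 [] (· ++ [p.2])) PySem.Dict.empty := by
    rw [List.foldl_map]
  rw [hm, PySem.Dict.getD_foldl_modify_append]
  simp only [PySem.Dict.getD_empty, List.nil_append, List.filter_map, List.map_map,
    Function.comp_def, hp]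

-- A's nested append loops produce exactly the flatMap-of-map of the per-cell groups.
theorem pv_nested_eq_flatMap (P Q : Int) (grp : Int → Int → List Int) :
    (PySem.List.pyRange 0 P 1).foldl (fun acc y =>
        (PySem.List.pyRange 0 Q 1).foldl (fun acc z => acc ++ [grp y z]) acc) []
      = (PySem.List.pyRange 0 P 1).flatMap (fun y =>
          (PySem.List.pyRange 0 Q 1).map (fun z => grp y z)) := by
  rw [PySem.List.foldl_congr_mem (PySem.List.pyRange 0 P 1) _
        (fun acc y => acc ++ (PySem.List.pyRange 0 Q 1).map (fun z => grp y z)) []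
        (fun acc x _ => PySem.List.foldl_append_singleton_eq_map _ _ _)]
  simpa using PySem.List.foldl_append_eq_flatMap
    (fun y => (PySem.List.pyRange 0 Q 1).map (fun z => grp y z)) (PySem.List.pyRange 0 P 1) []

-- One component of A equals one component of B, for any items list and coordinate projections.
theorem pv_component_eq (L : List (Int × Int × Int × Int))
    (k₁ k₂ : Int × Int × Int × Int → Int) (P Q : Int) :
    (PySem.List.pyRange 0 P 1).foldl (fun acc y =>
        (PySem.List.pyRange 0 Q 1).foldl (fun acc z =>
          acc ++ [(L.filter (fun e => k₁ e == y && k₂ e == z)).map (·.1)]) acc) []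
      = (PySem.List.pyRange 0 P 1).flatMap (fun y =>
          (PySem.List.pyRange 0 Q 1).map (fun z =>
            (L.foldl (fun d e => d.modify (k₁ e, k₂ e) [] (· ++ [e.1])) PySem.Dict.empty).getD (y, z) [])) := by
  rw [pv_nested_eq_flatMap P Q
        (fun y z => (L.filter (fun e => k₁ e == y && k₂ e == z)).map (·.1))]
  simp only [pv_bucket_getD]

-- The whole else-branch of A equals the whole else-branch of B, for any items list L.
theorem pv_main (L : List (Int × Int × Int × Int)) (d1 d2 d3 : Int) :
    ((PySem.List.pyRange 0 d2 1).foldl (fun acc y =>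
        (PySem.List.pyRange 0 d3 1).foldl (fun acc z =>
          acc ++ [(L.filter (fun e => e.2.2.1 == y && e.2.2.2 == z)).map (·.1)]) acc) [],
     (PySem.List.pyRange 0 d1 1).foldl (fun acc x =>
        (PySem.List.pyRange 0 d3 1).foldl (fun acc z =>
          acc ++ [(L.filter (fun e => e.2.1 == x && e.2.2.2 == z)).map (·.1)]) acc) [],
     (PySem.List.pyRange 0 d1 1).foldl (fun acc x =>
        (PySem.List.pyRange 0 d2 1).foldl (fun acc y =>
          acc ++ [(L.filter (fun e => e.2.1 == x && e.2.2.1 == y)).map (·.1)]) acc) [])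
    = ((PySem.List.pyRange 0 d2 1).flatMap (fun y =>
          (PySem.List.pyRange 0 d3 1).map (fun z =>
            (L.foldl (fun t e =>
                (t.1.modify (e.2.2.1, e.2.2.2) [] (· ++ [e.1]),
                 t.2.1.modify (e.2.1, e.2.2.2) [] (· ++ [e.1]),
                 t.2.2.modify (e.2.1, e.2.2.1) [] (· ++ [e.1])))
              (PySem.Dict.empty, PySem.Dict.empty, PySem.Dict.empty)).1.getD (y, z) [])),
       (PySem.List.pyRange 0 d1 1).flatMap (fun x =>
          (PySem.List.pyRange 0 d3 1).map (fun z =>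
            (L.foldl (fun t e =>
                (t.1.modify (e.2.2.1, e.2.2.2) [] (· ++ [e.1]),
                 t.2.1.modify (e.2.1, e.2.2.2) [] (· ++ [e.1]),
                 t.2.2.modify (e.2.1, e.2.2.1) [] (· ++ [e.1])))
              (PySem.Dict.empty, PySem.Dict.empty, PySem.Dict.empty)).2.1.getD (x, z) [])),
       (PySem.List.pyRange 0 d1 1).flatMap (fun x =>
          (PySem.List.pyRange 0 d2 1).map (fun y =>
            (L.foldl (fun t e =>
                (t.1.modify (e.2.2.1, e.2.2.2) [] (· ++ [e.1]),
                 t.2.1.modify (e.2.1, e.2.2.2) [] (· ++ [e.1]),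
                 t.2.2.modify (e.2.1, e.2.2.1) [] (· ++ [e.1])))
              (PySem.Dict.empty, PySem.Dict.empty, PySem.Dict.empty)).2.2.getD (x, y) []))) := by
  rw [show (L.foldl (fun t e =>
          (t.1.modify (e.2.2.1, e.2.2.2) [] (· ++ [e.1]),
           t.2.1.modify (e.2.1, e.2.2.2) [] (· ++ [e.1]),
           t.2.2.modify (e.2.1, e.2.2.1) [] (· ++ [e.1])))
        (PySem.Dict.empty, PySem.Dict.empty, PySem.Dict.empty))
      = (L.foldl (fun d e => d.modify (e.2.2.1, e.2.2.2) [] (· ++ [e.1])) PySem.Dict.empty,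
         L.foldl (fun d e => d.modify (e.2.1, e.2.2.2) [] (· ++ [e.1])) PySem.Dict.empty,
         L.foldl (fun d e => d.modify (e.2.1, e.2.2.1) [] (· ++ [e.1])) PySem.Dict.empty) from
      pv_foldl_triple L (fun d e => d.modify (e.2.2.1, e.2.2.2) [] (· ++ [e.1]))
        (fun d e => d.modify (e.2.1, e.2.2.2) [] (· ++ [e.1]))
        (fun d e => d.modify (e.2.1, e.2.2.1) [] (· ++ [e.1]))
        PySem.Dict.empty PySem.Dict.empty PySem.Dict.empty]
  exact Prod.ext
    (pv_component_eq L (fun e => e.2.2.1) (fun e => e.2.2.2) d2 d3)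
    (Prod.ext
      (pv_component_eq L (fun e => e.2.1) (fun e => e.2.2.2) d1 d3)
      (pv_component_eq L (fun e => e.2.1) (fun e => e.2.2.1) d1 d2))

-- ===== VERDICT (by name: the statement is the Claim_ definition above) =====
theorem partition_by_3d_py_spec : Claim_equal_partition_by_3d_py := by
  intro nodes dim1 dim2 dim3 _
  show partition_by_3d_py nodes dim1 dim2 dim3 = partition_by_3d_py_alt nodes dim1 dim2 dim3
  by_cases h : dim1 * dim2 * dim3 ≠ (nodes.length : Int)
  · simp only [partition_by_3d_py, partition_by_3d_py_alt, if_pos h]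
  · simp only [partition_by_3d_py, partition_by_3d_py_alt, if_neg h]
    exact pv_main _ dim1 dim2 dim3
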